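-- pv_equiv track=rewrite | github.com/josephtingiris/vscode-keyboard-navigation | bin/keybindings-duplicate.py | group_objects_with_comments
-- ===== SOURCE A (Python) =====
-- def group_objects_with_comments(array_text: str) -> tuple[list[tuple[str, str]], str]:
--     """Split array body into (leading_comments, object_text) groups."""
--     groups: list[tuple[str, str]] = []
--     comments = ""
--     buf = ""
--     depth = 0
--     in_obj = False
--     for line in array_text.splitlines(keepends=True):
--         stripped = line.strip()
--         if not in_obj:
--             if "{" in stripped:
--                 in_obj = True
--                 depth = stripped.count("{") - stripped.count("}")
--                 buf = line
--             else:
--                 comments += line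
--         else:
--             buf += line
--             depth += line.count("{") - line.count("}")
--             if depth == 0:
--                 groups.append((comments, buf))
--                 comments = ""
--                 buf = ""
--                 in_obj = False
--     return groups, comments
-- ===== SOURCE B (Python) =====
-- def group_objects_with_comments(array_text: str) -> tuple[list[tuple[str, str]], str]:
--     """Split array body into (leading_comments, object_text) groups."""
--     items = [("{" in l.strip(), l.count("{") - l.count("}"), l)
--              for l in array_text.splitlines(keepends=True)]
--     return _parse(items)
--
-- def _parse(items):
--     # skip leading lines with no '{': they are this group's comments
--     k = 0
--     while k < len(items) and not items[k][0]:
--         k += 1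
--     comments = "".join(l for _, _, l in items[:k])
--     if k == len(items):
--         return [], comments
--     _, d0, first = items[k]
--     obj, rest = _close(items[k + 1:], first, d0)
--     if obj is None:
--         return [], comments  # unterminated object: discard it
--     groups, trailing = _parse(rest)
--     return [(comments, obj)] + groups, trailing
--
-- def _close(items, buf, depth):
--     for j, (_, d, l) in enumerate(items):
--         buf += l
--         depth += d
--         if depth == 0:
--             return buf, items[j + 1:]
--     return None, []
-- ===== Notes on version B (the rewrite author's own statement) =====
-- stated objective: alternative
-- what changed: Replaces A's single-pass 5-field state machine with a staged pipeline: annotate every line once with its brace flag and brace delta, then a recursive descent (_parse/_close) that splits off one (comments, object) group per call from the annotated list.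
import Mathlib
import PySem

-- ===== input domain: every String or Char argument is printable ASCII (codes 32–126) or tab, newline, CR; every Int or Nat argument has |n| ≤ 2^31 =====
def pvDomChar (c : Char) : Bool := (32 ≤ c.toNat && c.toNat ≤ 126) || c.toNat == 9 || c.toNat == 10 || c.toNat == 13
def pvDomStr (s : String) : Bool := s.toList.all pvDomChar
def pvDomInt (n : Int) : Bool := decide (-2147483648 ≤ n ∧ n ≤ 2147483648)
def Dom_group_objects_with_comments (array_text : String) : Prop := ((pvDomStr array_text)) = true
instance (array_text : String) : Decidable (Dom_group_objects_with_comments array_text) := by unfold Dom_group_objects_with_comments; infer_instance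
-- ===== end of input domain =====

-- B replaces A's one-pass 5-field state machine by a staged pipeline: annotate each line
-- with (has-brace flag, brace delta), then a recursive descent that splits off one
-- (comments, object) group per call; same return value, no speed claim.

-- Shared helper: str.splitlines(keepends=True), ported by hand (PySem has only the
-- keepends=False form). Exact on the domain (only '\n', '\r', '\r\n' break lines there;
-- the exotic Unicode line breaks Python also honours are outside printable ASCII+tab).
def pvSplitKeep : List Char → List Char → List String
  | [], acc => if acc = [] then [] else [String.ofList acc.reverse]
  | '\n' :: rest, acc => String.ofList (acc.reverse ++ ['\n']) :: pvSplitKeep rest []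
  | '\r' :: '\n' :: rest, acc => String.ofList (acc.reverse ++ ['\r', '\n']) :: pvSplitKeep rest []
  | '\r' :: rest, acc => String.ofList (acc.reverse ++ ['\r']) :: pvSplitKeep rest []
  | c :: rest, acc => pvSplitKeep rest (c :: acc)

-- s.count("{") - s.count("}")
def pvCnt (s : String) : Int := (PySem.Str.count s "{" : Int) - (PySem.Str.count s "}" : Int)

-- ===== PORT A =====
-- loop body of A's for-loop; state = (groups, comments, buf, depth, in_obj)
def pvStepA (st : (List (String × String)) × String × String × Int × Bool) (line : String) :
    (List (String × String)) × String × String × Int × Bool :=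
  match st with
  | (groups, comments, buf, depth, false) =>   -- "if not in_obj:"
    let stripped := PySem.Str.strip line
    if PySem.Str.isIn "{" stripped then (groups, comments, line, pvCnt stripped, true)
    else (groups, comments ++ line, buf, depth, false)
  | (groups, comments, buf, depth, true) =>
    let buf' := buf ++ line
    let depth' := depth + pvCnt line
    if depth' = 0 then (groups ++ [(comments, buf')], "", "", depth', false)
    else (groups, comments, buf', depth', true)

def group_objects_with_comments (array_text : String) : (List (String × String)) × String :=
  let st := (pvSplitKeep array_text.toList []).foldl pvStepA ([], "", "", 0, false)
  (st.1, st.2.1)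

-- ===== PORT B =====
-- stage 1: annotate each line with ("{" in l.strip(), l.count("{") - l.count("}"))
def pvItem (l : String) : Bool × Int × String :=
  (PySem.Str.isIn "{" (PySem.Str.strip l), pvCnt l, l)

-- B's _close: consume annotated lines until the accumulated depth hits 0; returns
-- (closed object text, remaining items), or (none, []) when the object never closes.
def pvClose : List (Bool × Int × String) → String → Int → Option String × List (Bool × Int × String)
  | [], _, _ => (none, [])
  | (_, d, l) :: rest, buf, depth =>
    let buf' := buf ++ l
    let depth' := depth + d
    if depth' = 0 then (some buf', rest) else pvClose rest buf' depth'

-- needed by pvParse's termination proof: _close returns a suffix of its input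
theorem pvClose_suffix : ∀ (items : List (Bool × Int × String)) (buf : String) (depth : Int),
    (pvClose items buf depth).2 <:+ items := by
  intro items
  induction items with
  | nil => intro _ _; simp [pvClose]
  | cons it rest ih =>
    intro buf depth
    obtain ⟨f, d, l⟩ := it
    simp only [pvClose]
    split
    · exact List.suffix_cons _ _
    · exact (ih _ _).trans (List.suffix_cons _ _)

-- B's _parse: split off leading comment lines, close one object, recurse on the rest
def pvParse (items : List (Bool × Int × String)) : (List (String × String)) × String :=
  let cs := items.takeWhile (fun it => !it.1)
  let comments := PySem.Str.join "" (cs.map (fun it => it.2.2))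
  match hr : items.dropWhile (fun it => !it.1) with
  | [] => ([], comments)
  | (fl, d0, first) :: tl =>
    match hc : pvClose tl first d0 with
    | (none, _) => ([], comments)   -- unterminated object: discard it
    | (some obj, rem) =>
      let p := pvParse rem
      ((comments, obj) :: p.1, p.2)
termination_by items.length
decreasing_by
  have h1 : rem <:+ tl := by
    have h := pvClose_suffix tl first d0
    rw [hc] at h; exact h
  have h2 : (fl, d0, first) :: tl <:+ items := by
    rw [← hr]; exact List.dropWhile_suffix _
  have := h1.length_le
  have := h2.length_le
  simp at this ⊢
  omega

def group_objects_with_comments_alt (array_text : String) : (List (String × String)) × String :=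
  pvParse ((pvSplitKeep array_text.toList []).map pvItem)

-- ===== PRECONDITION & SPEC =====
def Spec_group_objects_with_comments (array_text : String) (out : (List (String × String)) × String) : Prop := out = group_objects_with_comments_alt array_text
instance (array_text : String) (out : (List (String × String)) × String) : Decidable (Spec_group_objects_with_comments array_text out) := by unfold Spec_group_objects_with_comments; infer_instance

-- ===== CLAIM (what is proved, stated in full; the proofs are below) =====
def Claim_equal_group_objects_with_comments : Prop := ∀ (array_text : String), Dom_group_objects_with_comments array_text → Spec_group_objects_with_comments array_text (group_objects_with_comments array_text)

-- ===== LEMMAS AND PROOFS =====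

-- Python's s.count(c) for a single character c is plain character counting
theorem pvCount_go_single (c : Char) : ∀ (fuel : Nat) (l : List Char) (acc : Nat),
    l.length ≤ fuel → PySem.Chars.count.go [c] fuel l acc = acc + l.count c := by
  intro fuel
  induction fuel with
  | zero =>
    intro l acc h
    have : l = [] := List.eq_nil_of_length_eq_zero (Nat.le_zero.mp h)
    subst this; simp [PySem.Chars.count.go]
  | succ n ih =>
    intro l acc h
    cases l with
    | nil => simp [PySem.Chars.count.go]
    | cons x t =>
      simp only [PySem.Chars.count.go]
      by_cases hx : c = x
      · subst hx
        have hp : List.isPrefixOf [c] (c :: t) = true := by simp [List.isPrefixOf]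
        simp only [hp, List.length, List.drop]
        rw [ih t (acc + 1) (by simpa using Nat.le_of_succ_le_succ h)]
        simp
        omega
      · have hp : List.isPrefixOf [c] (x :: t) = false := by
          simp [List.isPrefixOf]
          exact hx
        simp only [hp]
        rw [if_neg (by simp)]
        rw [ih t acc (by simpa using Nat.le_of_succ_le_succ h)]
        have hxc : ¬x = c := fun hxx => hx hxx.symm
        simp [List.count_cons, hxc]

theorem pvCount_single (s : List Char) (c : Char) : PySem.Chars.count s [c] = s.count c := by
  simp [PySem.Chars.count, pvCount_go_single c s.length s 0 le_rfl]

-- dropping a prefix of chars that are not c leaves the count of c unchanged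
theorem pvCount_dropWhile (p : Char → Bool) (c : Char) (hc : p c = false) :
    ∀ l : List Char, (l.dropWhile p).count c = l.count c := by
  intro l
  induction l with
  | nil => rfl
  | cons a t ih =>
    by_cases h : p a
    · have hne : a ≠ c := fun he => by rw [he, hc] at h; exact Bool.false_ne_true h
      simp [h, ih, hne]
    · simp [h]

-- strip removes only whitespace, so brace counts are unchanged
theorem pvCnt_strip (s : String) : pvCnt (PySem.Str.strip s) = pvCnt s := by
  have key : ∀ c : Char, PySem.Chars.isspace c = false →
      (PySem.Chars.strip s.toList).count c = s.toList.count c := by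
    intro c hc
    simp only [PySem.Chars.strip, PySem.Chars.rstrip, PySem.Chars.lstrip]
    rw [List.count_reverse, pvCount_dropWhile _ _ hc, List.count_reverse,
      pvCount_dropWhile _ _ hc]
  simp only [pvCnt, PySem.Str.count]
  have h1 := key '{' (by decide)
  have h2 := key '}' (by decide)
  have ht : (PySem.Str.strip s).toList = PySem.Chars.strip s.toList := by simp
  rw [ht, (by decide : ("{" : String).toList = ['{']), (by decide : ("}" : String).toList = ['}'])]
  rw [pvCount_single, pvCount_single, pvCount_single, pvCount_single, h1, h2]

theorem pvJoin_empty_cons (l : String) (ls : List String) :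
    PySem.Str.join "" (l :: ls) = l ++ PySem.Str.join "" ls := by
  have flat : ∀ xs : List (List Char), (List.intersperse ([] : List Char) xs).flatten = xs.flatten := by
    intro xs
    induction xs with
    | nil => rfl
    | cons x t ih => cases t <;> simp_all [List.intersperse]
  apply String.toList_inj.mp
  simp [PySem.Str.join, PySem.Chars.join, List.intercalate, flat, String.toList_append]

-- A's fold over comment-only lines just appends them to the comments accumulator
theorem pvFoldA_comments (ls : List String)
    (h : ∀ l ∈ ls, PySem.Str.isIn "{" (PySem.Str.strip l) = false) :
    ∀ (g : List (String × String)) (c b : String) (d : Int),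
    ls.foldl pvStepA (g, c, b, d, false) = (g, c ++ PySem.Str.join "" ls, b, d, false) := by
  induction ls with
  | nil =>
    intro g c b d
    have hj : PySem.Str.join "" ([] : List String) = "" := rfl
    simp [hj]
  | cons l t ih =>
    intro g c b d
    simp only [List.foldl_cons, pvStepA, h l (List.mem_cons_self ..)]
    rw [if_neg (by simp [h l (List.mem_cons_self ..)])]
    rw [ih (fun x hx => h x (List.mem_cons_of_mem _ hx)) g (c ++ l) b d]
    rw [pvJoin_empty_cons, String.append_assoc]

-- per-item consistency: the stored flag and delta are what A recomputes per line
def pvInv (it : Bool × Int × String) : Prop :=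
  it.1 = PySem.Str.isIn "{" (PySem.Str.strip it.2.2) ∧ it.2.1 = pvCnt it.2.2

-- A's fold in the in_obj state, when B's _close finds the closing line
theorem pvFoldA_close_some : ∀ (items : List (Bool × Int × String)),
    (∀ it ∈ items, pvInv it) →
    ∀ (buf : String) (d : Int) (o : String) (rem : List (Bool × Int × String)),
    pvClose items buf d = (some o, rem) →
    ∀ (g : List (String × String)) (c : String),
    (items.map (fun it => it.2.2)).foldl pvStepA (g, c, buf, d, true)
      = (rem.map (fun it => it.2.2)).foldl pvStepA (g ++ [(c, o)], "", "", 0, false) := by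
  intro items
  induction items with
  | nil => intro _ buf d o rem hc; simp [pvClose] at hc
  | cons it t ih =>
    intro hI buf d o rem hc g c
    obtain ⟨f, dl, l⟩ := it
    have hdl : dl = pvCnt l := (hI _ (List.mem_cons_self ..)).2
    subst hdl
    simp only [pvClose] at hc
    simp only [List.map_cons, List.foldl_cons, pvStepA]
    by_cases hz : d + pvCnt l = 0
    · rw [if_pos hz] at hc
      rw [if_pos hz]
      have h1 := congrArg Prod.fst hc
      have h2 := congrArg Prod.snd hc
      simp at h1 h2
      subst h1; subst h2
      rw [hz]
    · rw [if_neg hz] at hc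
      rw [if_neg hz]
      exact ih (fun x hx => hI x (List.mem_cons_of_mem _ hx)) _ _ _ _ hc g c

-- A's fold in the in_obj state, when B's _close runs off the end
theorem pvFoldA_close_none : ∀ (items : List (Bool × Int × String)),
    (∀ it ∈ items, pvInv it) →
    ∀ (buf : String) (d : Int),
    (pvClose items buf d).1 = none →
    ∀ (g : List (String × String)) (c : String),
    ((items.map (fun it => it.2.2)).foldl pvStepA (g, c, buf, d, true)).1 = g ∧
    ((items.map (fun it => it.2.2)).foldl pvStepA (g, c, buf, d, true)).2.1 = c := by
  intro items
  induction items with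
  | nil => intro _ buf d _ g c; simp
  | cons it t ih =>
    intro hI buf d hc g c
    obtain ⟨f, dl, l⟩ := it
    have hdl : dl = pvCnt l := (hI _ (List.mem_cons_self ..)).2
    subst hdl
    simp only [pvClose] at hc
    simp only [List.map_cons, List.foldl_cons, pvStepA]
    by_cases hz : d + pvCnt l = 0
    · exact absurd hc (by rw [if_pos hz]; simp)
    · rw [if_neg hz] at hc
      rw [if_neg hz]
      exact ih (fun x hx => hI x (List.mem_cons_of_mem _ hx)) _ _ hc g c

-- A threads the pending comments into the first group B produces
def pvAddC (c : String) : (List (String × String)) × String → (List (String × String)) × String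
  | ([], tr) => ([], c ++ tr)
  | ((cm, b) :: gs, tr) => ((c ++ cm, b) :: gs, tr)

theorem pvAddC_empty (p : (List (String × String)) × String) : pvAddC "" p = p := by
  obtain ⟨gs, tr⟩ := p
  cases gs with
  | nil => simp [pvAddC, String.empty_append]
  | cons g t => obtain ⟨cm, b⟩ := g; simp [pvAddC, String.empty_append]

-- main simulation: A's fold from a fresh (no-object) state computes B's _parse,
-- with the pending comments c spliced into the first group (or the trailing comments)
theorem pvMain : ∀ (n : Nat) (items : List (Bool × Int × String)), items.length ≤ n →
    (∀ it ∈ items, pvInv it) →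
    ∀ (g : List (String × String)) (c : String),
    (((items.map (fun it => it.2.2)).foldl pvStepA (g, c, "", 0, false)).1,
     ((items.map (fun it => it.2.2)).foldl pvStepA (g, c, "", 0, false)).2.1)
      = (g ++ (pvAddC c (pvParse items)).1, (pvAddC c (pvParse items)).2) := by
  intro n
  induction n with
  | zero =>
    intro items hlen hI g c
    have : items = [] := List.eq_nil_of_length_eq_zero (Nat.le_zero.mp hlen)
    subst this
    have hj : PySem.Str.join "" ([] : List String) = "" := rfl
    simp [pvParse, pvAddC, hj]
  | succ n ih =>
    intro items hlen hI g c
    have hsplit : items = items.takeWhile (fun it => !it.1) ++ items.dropWhile (fun it => !it.1) :=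
      (List.takeWhile_append_dropWhile ..).symm
    have hcs : ∀ l ∈ (items.takeWhile (fun it => !it.1)).map (fun it => it.2.2),
        PySem.Str.isIn "{" (PySem.Str.strip l) = false := by
      intro l hl
      obtain ⟨it, hit, rfl⟩ := List.mem_map.mp hl
      have h1 : (!it.1) = true := List.mem_takeWhile_imp (p := fun it : Bool × Int × String => !it.1) hit
      have h2 := (hI it ((List.takeWhile_sublist _).subset hit)).1
      rw [← h2]
      simpa using h1
    rw [pvParse]
    conv_lhs => rw [hsplit]
    rw [List.map_append, List.foldl_append,
      pvFoldA_comments _ hcs g c "" 0]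
    set C := PySem.Str.join "" ((items.takeWhile (fun it => !it.1)).map (fun it => it.2.2)) with hC
    cases hr : items.dropWhile (fun it => !it.1) with
    | nil => simp [pvAddC]
    | cons hd tl =>
      obtain ⟨f, d0, first⟩ := hd
      have hmemrest : ∀ x ∈ (f, d0, first) :: tl, x ∈ items := by
        intro x hx
        exact (hr ▸ List.dropWhile_suffix (l := items) (p := fun it => !it.1)).subset hx
      have hf : f = true := by
        have := List.head?_dropWhile_not (p := fun it => !it.1) (l := items)
        rw [hr] at this
        simpa using this
      have hflag : PySem.Str.isIn "{" (PySem.Str.strip first) = true := by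
        have := (hI _ (hmemrest _ (List.mem_cons_self ..))).1
        simp only at this
        rw [← this, hf]
      have hd0 : d0 = pvCnt first := (hI _ (hmemrest _ (List.mem_cons_self ..))).2
      simp only [List.map_cons, List.foldl_cons, pvStepA, hflag, if_pos]
      rw [pvCnt_strip first, ← hd0]
      cases hc : pvClose tl first d0 with
      | mk o rem =>
        cases o with
        | none =>
          have := pvFoldA_close_none tl
            (fun x hx => hI x (hmemrest _ (List.mem_cons_of_mem _ hx))) first d0
            (by rw [hc]) g (c ++ C)
          simp only [Prod.mk.injEq]
          exact ⟨by rw [this.1]; simp [pvAddC], by rw [this.2]; simp [pvAddC]⟩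
        | some obj =>
          rw [pvFoldA_close_some tl
            (fun x hx => hI x (hmemrest _ (List.mem_cons_of_mem _ hx))) first d0 obj rem hc g (c ++ C)]
          have hlrem : rem.length ≤ n := by
            have h1 : rem <:+ tl := by
              have h := pvClose_suffix tl first d0
              rw [hc] at h; exact h
            have h2 := h1.length_le
            have h3 := (hr ▸ List.dropWhile_suffix (l := items) (p := fun it => !it.1)).length_le
            simp at h3
            omega
          rw [ih rem hlrem (fun x hx => hI x ((hmemrest _ (List.mem_cons_of_mem _
            ((by { have h := pvClose_suffix tl first d0; rw [hc] at h; exact h } : rem <:+ tl).subset hx)))))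
            (g ++ [(c ++ C, obj)]) ""]
          rw [pvAddC_empty]
          simp [pvAddC, List.append_assoc]

-- the third component of an annotated item is the line itself
theorem pvMap_item (lines : List String) :
    (lines.map pvItem).map (fun it => it.2.2) = lines := by
  simp [pvItem, Function.comp_def]

-- ===== VERDICT (by name: the statement is the Claim_ definition above) =====
theorem group_objects_with_comments_spec : Claim_equal_group_objects_with_comments := by
  intro array_text _
  unfold Spec_group_objects_with_comments group_objects_with_comments group_objects_with_comments_alt
  have hI : ∀ it ∈ (pvSplitKeep array_text.toList []).map pvItem, pvInv it := by
    intro it hit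
    obtain ⟨l, _, rfl⟩ := List.mem_map.mp hit
    refine ⟨?_, ?_⟩ <;> simp [pvItem]
  have h := pvMain ((pvSplitKeep array_text.toList []).map pvItem).length
    ((pvSplitKeep array_text.toList []).map pvItem) le_rfl hI [] ""
  rw [pvMap_item, pvAddC_empty] at h
  simpa using h
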